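-- pv_equiv track=rewrite | github.com/El1teW0lf/2024_2025__p04_projet2_n1 | syntax/parse.py | divide_tokens
-- ===== SOURCE A (Python) =====
-- def divide_tokens(divided_code):
--     dividers = ['"', "'", "(", ")", "[", "]", "{", "}", "#", "+", "=", "*", "/", "-", ",", "\t", "\n", " ", ":"]
--     result = [[]]
--     text = ""
--     for i in divided_code:
--         if i in dividers:
--                 if text:
--                     result[len(result) - 1].append(text)
--                     text = ""
--                 result[len(result) - 1].append(i)
--         else:
--                 text += i
--
--
--
--     if not result[-1]:
--         result.pop()
--
--     return result
-- ===== SOURCE B (Python) =====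
-- def divide_tokens(divided_code):
--     # Delimiter-anchored tokenizer: each delimiter occurrence emits the text
--     # run since the previous delimiter (if any) followed by the delimiter itself.
--     dividers = set('"\'()[]{}#+=*/-,\t\n :')
--     cuts = [(i, c) for i, c in enumerate(divided_code) if c in dividers]
--     tokens = []
--     prev = 0
--     for i, c in cuts:
--         if i > prev:
--             tokens.append(divided_code[prev:i])
--         tokens.append(c)
--         prev = i + 1
--     return [tokens] if tokens else []
-- ===== Notes on version B (the rewrite author's own statement) =====
-- stated objective: faster
-- what changed: B is a two-phase delimiter-anchored tokenizer: it first collects all delimiter occurrences with enumerate, then emits for each one the slice since the previous delimiter plus the delimiter itself, replacing A's char-by-char buffer accumulation (text += i) and repeated result[len(result)-1] mutation with bulk slicing and O(1) set membership.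
import Mathlib
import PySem

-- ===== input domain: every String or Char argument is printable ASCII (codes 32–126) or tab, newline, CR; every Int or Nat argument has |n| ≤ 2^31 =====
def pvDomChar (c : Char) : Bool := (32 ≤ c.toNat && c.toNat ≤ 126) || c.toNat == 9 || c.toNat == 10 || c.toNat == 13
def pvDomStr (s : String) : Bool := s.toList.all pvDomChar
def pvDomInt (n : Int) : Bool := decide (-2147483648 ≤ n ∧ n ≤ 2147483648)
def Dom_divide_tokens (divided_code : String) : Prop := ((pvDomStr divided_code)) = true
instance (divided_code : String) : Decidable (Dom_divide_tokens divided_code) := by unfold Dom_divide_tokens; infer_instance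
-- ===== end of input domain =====

-- B tokenizes in two phases — collect the delimiter occurrences, then slice the
-- text run before each — instead of A's char-by-char buffer-and-flush loop
-- (objective: faster by a constant factor, measured).

-- ===== PORT A =====
def pvDividers : List Char :=
  ['"', '\'', '(', ')', '[', ']', '{', '}', '#', '+', '=', '*', '/', '-', ',', '\t', '\n', ' ', ':']

-- result[len(result) - 1].append(s)
def pvAppendLast (r : List (List String)) (s : String) : List (List String) :=
  r.set (r.length - 1) (r.getD (r.length - 1) [] ++ [s])

-- body of A's for-loop; text kept as List Char ("text += i" = st.2 ++ [i])
def pvStepA (st : List (List String) × List Char) (i : Char) : List (List String) × List Char :=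
  if i ∈ pvDividers then
    let st1 := if st.2 ≠ [] then (pvAppendLast st.1 (String.mk st.2), ([] : List Char)) else st
    (pvAppendLast st1.1 (String.mk [i]), [])
  else (st.1, st.2 ++ [i])

def divide_tokens (divided_code : String) : List (List String) :=
  let st := divided_code.toList.foldl pvStepA ([[]], [])
  if st.1.getLastD [] = [] then st.1.dropLast else st.1

-- ===== PORT B =====
-- dividers = set('"\'()[]{}#+=*/-,\t\n :')
def pvDividersB : PySem.Set Char :=
  PySem.Set.ofList ['"', '\'', '(', ')', '[', ']', '{', '}', '#', '+', '=', '*', '/', '-', ',', '\t', '\n', ' ', ':']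

-- cuts = [(i, c) for i, c in enumerate(divided_code) if c in dividers]
def pvCuts (cs : List Char) : List (Int × Char) :=
  (PySem.List.enumerate cs 0).filter (fun p => decide (p.2 ∈ pvDividersB))

-- body of B's for-loop over cuts; state = (tokens, prev); slice = divided_code[prev:i]
def pvStepB (cs : List Char) (st : List String × Int) (p : Int × Char) : List String × Int :=
  let st1 := if p.1 > st.2 then
      (st.1 ++ [String.mk (PySem.List.slice cs (some st.2) (some p.1))], st.2)
    else st
  (st1.1 ++ [String.mk [p.2]], p.1 + 1)

def divide_tokens_alt (divided_code : String) : List (List String) :=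
  let cs := divided_code.toList
  let st := (pvCuts cs).foldl (pvStepB cs) ([], 0)
  if st.1 = [] then [] else [st.1]

-- ===== PRECONDITION & SPEC =====
def Spec_divide_tokens (divided_code : String) (out : List (List String)) : Prop := out = divide_tokens_alt divided_code
instance (divided_code : String) (out : List (List String)) : Decidable (Spec_divide_tokens divided_code out) := by unfold Spec_divide_tokens; infer_instance

-- ===== CLAIM (what is proved, stated in full; the proofs are below) =====
def Claim_equal_divide_tokens : Prop := ∀ (divided_code : String), Dom_divide_tokens divided_code → Spec_divide_tokens divided_code (divide_tokens divided_code)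

-- ===== LEMMAS AND PROOFS =====

-- "c not in dividers", shared by the proof-side characterisation of both loops
def pvNotDiv (c : Char) : Bool := c ∉ pvDividers

-- proof-side: the input up to (and including) its last delimiter
def pvTrimEnd (cs : List Char) : List Char :=
  (cs.reverse.dropWhile pvNotDiv).reverse

-- proof-side: the common token list — maximal runs and single delimiters
def pvScan : List Char → List String
  | [] => []
  | c :: rest =>
    if c ∈ pvDividers then String.mk [c] :: pvScan rest
    else String.mk (c :: rest.takeWhile pvNotDiv) :: pvScan (rest.dropWhile pvNotDiv)
termination_by cs => cs.length
decreasing_by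
  · simp
  · have := List.length_dropWhile_le pvNotDiv rest
    simp; omega

theorem pvNotDiv_true {c : Char} (h : c ∉ pvDividers) : pvNotDiv c = true := by
  simp [pvNotDiv, h]

theorem pvNotDiv_false {c : Char} (h : c ∈ pvDividers) : pvNotDiv c = false := by
  simp [pvNotDiv, h]

theorem pvAppendLast_singleton (L : List String) (s : String) :
    pvAppendLast [L] s = [L ++ [s]] := by
  simp [pvAppendLast]

theorem pvDropWhile_all (t : List Char) (ht : ∀ x ∈ t, x ∉ pvDividers) :
    t.dropWhile pvNotDiv = [] := by
  induction t with
  | nil => rfl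
  | cons d t' ih =>
    rw [List.dropWhile_cons_of_pos (pvNotDiv_true (ht d (by simp)))]
    exact ih (fun x hx => ht x (by simp [hx]))

theorem pvTrimEnd_all (t : List Char) (ht : ∀ x ∈ t, x ∉ pvDividers) :
    pvTrimEnd t = [] := by
  unfold pvTrimEnd
  rw [pvDropWhile_all t.reverse (fun x hx => ht x (List.mem_reverse.mp hx))]
  rfl

theorem pvTrimEnd_append_delim (t r : List Char) (c : Char)
    (_ht : ∀ x ∈ t, x ∉ pvDividers) (hc : c ∈ pvDividers) :
    pvTrimEnd (t ++ c :: r) = t ++ c :: pvTrimEnd r := by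
  unfold pvTrimEnd
  rw [List.reverse_append, List.reverse_cons, List.append_assoc,
      List.dropWhile_append]
  by_cases h : (r.reverse.dropWhile pvNotDiv).isEmpty
  · rw [if_pos h, List.isEmpty_iff.mp h]
    rw [List.singleton_append, List.dropWhile_cons_of_neg (by simp [pvNotDiv_false hc])]
    simp
  · rw [if_neg h]
    simp

theorem pvRun (t : List Char) (c : Char) (xs : List Char)
    (ht : ∀ x ∈ t, x ∉ pvDividers) (hc : c ∈ pvDividers) :
    (t ++ c :: xs).takeWhile pvNotDiv = t ∧
    (t ++ c :: xs).dropWhile pvNotDiv = c :: xs := by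
  induction t with
  | nil =>
    constructor
    · rw [List.nil_append, List.takeWhile_cons_of_neg (by simp [pvNotDiv_false hc])]
    · rw [List.nil_append, List.dropWhile_cons_of_neg (by simp [pvNotDiv_false hc])]
  | cons d t' ih =>
    have hd := pvNotDiv_true (ht d (by simp))
    have ih' := ih (fun x hx => ht x (by simp [hx]))
    constructor
    · rw [List.cons_append, List.takeWhile_cons_of_pos hd, ih'.1]
    · rw [List.cons_append, List.dropWhile_cons_of_pos hd, ih'.2]

theorem pvScan_delim (t : List Char) (c : Char) (xs : List Char)
    (ht : ∀ x ∈ t, x ∉ pvDividers) (hc : c ∈ pvDividers) :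
    pvScan (t ++ c :: xs) =
      (if t = [] then [] else [String.mk t]) ++ String.mk [c] :: pvScan xs := by
  cases t with
  | nil => simp [pvScan, hc]
  | cons d t' =>
    have hd : d ∉ pvDividers := ht d (by simp)
    have h := pvRun t' c xs (fun x hx => ht x (by simp [hx])) hc
    rw [List.cons_append, pvScan, if_neg hd, h.1, h.2, pvScan, if_pos hc]
    simp

-- A's loop invariant: the fold from ([L], t) (t a delimiter-free buffer)
-- ends with first component [L ++ pvScan (pvTrimEnd (t ++ cs))]
theorem pvLoop_inv (cs : List Char) :
    ∀ (L : List String) (t : List Char), (∀ x ∈ t, x ∉ pvDividers) →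
      (cs.foldl pvStepA ([L], t)).1 = [L ++ pvScan (pvTrimEnd (t ++ cs))] := by
  induction cs with
  | nil =>
    intro L t ht
    simp [pvTrimEnd_all t ht, pvScan]
  | cons c r ih =>
    intro L t ht
    by_cases hc : c ∈ pvDividers
    · have hstep : pvStepA ([L], t) c =
          ([L ++ (if t = [] then [] else [String.mk t]) ++ [String.mk [c]]], []) := by
        by_cases h0 : t = []
        · simp [pvStepA, hc, h0, pvAppendLast_singleton]
        · simp [pvStepA, hc, h0, pvAppendLast_singleton, List.append_assoc]
      rw [List.foldl_cons, hstep,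
          ih (L ++ (if t = [] then [] else [String.mk t]) ++ [String.mk [c]]) []
            (by simp)]
      rw [pvTrimEnd_append_delim t r c ht hc, pvScan_delim t c (pvTrimEnd r) ht hc]
      simp
    · have hstep : pvStepA ([L], t) c = ([L], t ++ [c]) := by
        simp [pvStepA, hc]
      have ht' : ∀ x ∈ t ++ [c], x ∉ pvDividers := by
        intro x hx
        rcases List.mem_append.mp hx with h | h
        · exact ht x h
        · simp at h; subst h; exact hc
      rw [List.foldl_cons, hstep, ih L (t ++ [c]) ht']
      simp

-- B's set of dividers is A's list
theorem pvDividersB_eq : pvDividersB = pvDividers := by decide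

theorem pvFilter_enumerate_nodiv (t : List Char) (s : Int)
    (ht : ∀ x ∈ t, x ∉ pvDividers) :
    (PySem.List.enumerate t s).filter (fun p => decide (p.2 ∈ pvDividersB)) = [] := by
  rw [List.filter_eq_nil_iff]
  intro p hp
  rcases (PySem.List.mem_enumerate_iff _ _ _).mp hp with ⟨k, hk, rfl⟩
  simp [pvDividersB_eq, ht t[k] (List.getElem_mem hk)]

-- B's loop invariant: folding B's step over the cuts of the suffix cs.drop off
-- appends exactly pvScan (pvTrimEnd (cs.drop off)) to the accumulated tokens
theorem pvLoopB_inv (n : Nat) : ∀ (r : List Char), r.length = n →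
    ∀ (cs : List Char) (off : Nat) (acc : List String), cs.drop off = r →
    (((PySem.List.enumerate r (off : Int)).filter
        (fun p => decide (p.2 ∈ pvDividersB))).foldl (pvStepB cs) (acc, (off : Int))).1
      = acc ++ pvScan (pvTrimEnd r) := by
  induction n using Nat.strong_induction_on with
  | _ n ih =>
    intro r hn cs off acc hoff
    rcases hrest : r.dropWhile pvNotDiv with _ | ⟨c, r'⟩
    · -- no delimiter in r
      have ht : ∀ x ∈ r, x ∉ pvDividers := by
        intro x hx
        have hr : r.takeWhile pvNotDiv = r := by
          have h := List.takeWhile_append_dropWhile (p := pvNotDiv) (l := r)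
          rw [hrest, List.append_nil] at h; exact h
        have := List.mem_takeWhile_imp (show x ∈ r.takeWhile pvNotDiv by rw [hr]; exact hx)
        simpa [pvNotDiv] using this
      rw [pvFilter_enumerate_nodiv r _ ht, List.foldl_nil,
          pvTrimEnd_all r ht]
      simp [pvScan]
    · -- r = t ++ c :: r', t delimiter-free, c a delimiter
      set t := r.takeWhile pvNotDiv with htdef
      clear_value t
      have hsplit : r = t ++ c :: r' := by
        have := List.takeWhile_append_dropWhile (p := pvNotDiv) (l := r)
        rw [hrest, ← htdef] at this; exact this.symm
      have ht : ∀ x ∈ t, x ∉ pvDividers := by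
        intro x hx
        have := List.mem_takeWhile_imp (htdef ▸ hx)
        simpa [pvNotDiv] using this
      have hc : c ∈ pvDividers := by
        have hhd := List.head_dropWhile_not (p := pvNotDiv) (l := r) (by simp [hrest])
        simp only [hrest, List.head_cons] at hhd
        by_contra hcn
        rw [pvNotDiv_true hcn] at hhd; exact absurd hhd (by simp)
      -- split the enumerate/filter at the first delimiter
      rw [hsplit, PySem.List.enumerate_append, List.filter_append,
          pvFilter_enumerate_nodiv t _ ht, List.nil_append,
          PySem.List.enumerate_cons, List.filter_cons]
      rw [if_pos (by simp [pvDividersB_eq, hc])]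
      rw [List.foldl_cons]
      -- evaluate one step of B
      have hslice : PySem.List.slice cs (some (off : Int)) (some ((off : Int) + (t.length : Int)))
          = t := by
        rw [PySem.List.slice_natCast_add, hoff, hsplit, List.take_left]
      have hstep : pvStepB cs (acc, (off : Int)) ((off : Int) + (t.length : Int), c)
          = (acc ++ (if t = [] then [] else [String.mk t]) ++ [String.mk [c]],
             (off : Int) + (t.length : Int) + 1) := by
        by_cases h0 : t = []
        · simp [pvStepB, h0]
        · have hlen : 0 < t.length := List.length_pos_iff.mpr h0
          simp [pvStepB, hslice, hlen, h0]
      rw [hstep]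
      -- recurse on r'
      have hoff' : cs.drop (off + t.length + 1) = r' := by
        have h2 := congrArg (List.drop (t.length + 1)) hoff
        rw [List.drop_drop] at h2
        rw [show off + t.length + 1 = off + (t.length + 1) from by omega, h2, hsplit]
        simp
      have hlt : r'.length < n := by
        rw [← hn, hsplit]; simp; omega
      have hrec := ih r'.length hlt r' rfl cs (off + t.length + 1)
        (acc ++ (if t = [] then [] else [String.mk t]) ++ [String.mk [c]]) hoff'
      have hcast : ((off + t.length + 1 : Nat) : Int) = (off : Int) + (t.length : Int) + 1 := by
        push_cast; ring
      rw [hcast] at hrec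
      rw [hrec]
      rw [pvTrimEnd_append_delim t r' c ht hc, pvScan_delim t c (pvTrimEnd r') ht hc]
      simp

-- ===== VERDICT (by name: the statement is the Claim_ definition above) =====
theorem divide_tokens_spec : Claim_equal_divide_tokens := by
  intro s _
  unfold Spec_divide_tokens divide_tokens divide_tokens_alt pvCuts
  have hA := pvLoop_inv s.toList [] [] (by simp)
  simp only [List.nil_append] at hA
  have hB := pvLoopB_inv s.toList.length s.toList rfl s.toList 0 [] (by simp)
  simp only [Nat.cast_zero, List.nil_append] at hB
  rcases hst : s.toList.foldl pvStepA ([[]], []) with ⟨res, txt⟩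
  rw [hst] at hA; simp only at hA; subst hA
  simp only [hB]
  by_cases h0 : pvScan (pvTrimEnd s.toList) = [] <;> simp [h0]
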